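-- pv_equiv track=rewrite | github.com/965522693/Painting-games | NetRoom.py | get_port_by_name
-- ===== SOURCE A (Python) =====
-- def get_port_by_name(name, first=True):
--     low = 1024
--     bottle = 65535
--     if first:
--         count = (sum(ord(i) for i in name) + low) % bottle
--     else:
--         count = (name + low) % bottle
--     if bottle >= count >= low:
--         return count
--     else:
--         return get_port_by_name(count, False)
-- ===== SOURCE B (Python) =====
-- def get_port_by_name(name, first=True):
--     # Closed form: after taking % 65535 once, the value is in [0, 65534];
--     # one more +1024 adjustment is needed exactly when it is below 1024.
--     count = ((sum(map(ord, name)) if first else name) + 1024) % 65535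
--     return count if count >= 1024 else count + 1024
-- ===== Notes on version B (the rewrite author's own statement) =====
-- stated objective: simpler
-- what changed: Replaces the tail recursion with a closed form: since count % 65535 lies in [0,65534], the out-of-range case is exactly count < 1024 and a single +1024 fixes it, so B is branch-plus-arithmetic with no recursion or loop.
import Mathlib
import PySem

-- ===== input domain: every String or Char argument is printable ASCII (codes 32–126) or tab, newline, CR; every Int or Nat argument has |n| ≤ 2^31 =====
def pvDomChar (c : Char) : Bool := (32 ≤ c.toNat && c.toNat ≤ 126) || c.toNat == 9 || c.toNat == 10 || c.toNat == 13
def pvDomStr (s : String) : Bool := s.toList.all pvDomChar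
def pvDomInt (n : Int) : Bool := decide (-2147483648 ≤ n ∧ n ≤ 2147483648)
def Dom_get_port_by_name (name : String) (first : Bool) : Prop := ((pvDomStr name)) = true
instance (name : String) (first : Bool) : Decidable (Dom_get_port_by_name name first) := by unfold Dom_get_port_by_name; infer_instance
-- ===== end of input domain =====

-- B replaces A's tail recursion by a closed form (one conditional +1024 after the modulus); objective: simpler.
-- Pre_ excludes first = false, where both Pythons raise TypeError (string + int) under the str type of `name`.


-- ===== PORT A =====
-- sum(ord(i) for i in name)
def pySumOrd (name : String) : Int :=
  name.toList.foldl (fun acc c => acc + (c.toNat : Int)) 0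

-- the recursive call get_port_by_name(count, False) with an int argument;
-- fuel only makes the recursion structurally total (2 suffices: after one
-- % 65535 step the value is in [0,65534] and the next step always lands in range)
def pyPortGo : Nat → Int → Int
  | 0, _ => 0
  | fuel + 1, n =>
    let count := PySem.Int.mod (n + 1024) 65535
    if 1024 ≤ count ∧ count ≤ 65535 then count else pyPortGo fuel count

def get_port_by_name (name : String) (first : Bool) : Int :=
  if first then
    let count := PySem.Int.mod (pySumOrd name + 1024) 65535
    if 1024 ≤ count ∧ count ≤ 65535 then count else pyPortGo 2 count
  else 0  -- Python: TypeError (str + int); excluded by Pre_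

-- ===== PORT B =====
def get_port_by_name_alt (name : String) (first : Bool) : Int :=
  if first then
    let count := PySem.Int.mod ((name.toList.map (fun c => (c.toNat : Int))).sum + 1024) 65535
    if 1024 ≤ count then count else count + 1024
  else 0  -- Python: TypeError (str + int); excluded by Pre_

-- ===== PRECONDITION & SPEC =====
-- Pre_ excludes first = false: there Python A evaluates name + 1024 on a str and raises TypeError.
def Pre_get_port_by_name (name : String) (first : Bool) : Prop := first = true
instance (name : String) (first : Bool) : Decidable (Pre_get_port_by_name name first) := by unfold Pre_get_port_by_name; infer_instance
def pvWitness_get_port_by_name : String × Bool := ("room1", true)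

def Spec_get_port_by_name (name : String) (first : Bool) (out : Int) : Prop := out = get_port_by_name_alt name first
instance (name : String) (first : Bool) (out : Int) : Decidable (Spec_get_port_by_name name first out) := by unfold Spec_get_port_by_name; infer_instance

-- ===== CLAIM (what is proved, stated in full; the proofs are below) =====
def Claim_equal_get_port_by_name : Prop := ∀ (name : String) (first : Bool), Dom_get_port_by_name name first → Pre_get_port_by_name name first → Spec_get_port_by_name name first (get_port_by_name name first)

-- ===== LEMMAS AND PROOFS =====
theorem pySumOrd_eq (name : String) :
    pySumOrd name = (name.toList.map (fun c => (c.toNat : Int))).sum := by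
  unfold pySumOrd
  have h : ∀ (l : List Char) (a : Int),
      l.foldl (fun acc c => acc + (c.toNat : Int)) a = a + (l.map (fun c => (c.toNat : Int))).sum := by
    intro l
    induction l with
    | nil => intro a; simp
    | cons c cs ih => intro a; simp [ih]; ring
  simpa using h name.toList 0

-- ===== VERDICT (by name: the statement is the Claim_ definition above) =====
theorem get_port_by_name_spec : Claim_equal_get_port_by_name := by
  intro name first hdom hpre
  unfold Pre_get_port_by_name at hpre
  subst hpre
  unfold Spec_get_port_by_name get_port_by_name get_port_by_name_alt
  simp only [if_true, pySumOrd_eq]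
  set S := (name.toList.map (fun c => (c.toNat : Int))).sum with hS
  have hpos : (0 : Int) < 65535 := by norm_num
  set c := PySem.Int.mod (S + 1024) 65535 with hc
  have hmod : c = (S + 1024) % 65535 := PySem.Int.mod_eq_emod_of_pos hpos
  have h0 : 0 ≤ c := by rw [hmod]; exact Int.emod_nonneg _ (by norm_num)
  have h1 : c < 65535 := by rw [hmod]; exact Int.emod_lt_of_pos _ hpos
  by_cases hge : 1024 ≤ c
  · rw [if_pos ⟨hge, by omega⟩, if_pos hge]
  · rw [if_neg (fun h => hge h.1), if_neg hge]
    unfold pyPortGo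
    have h2 : PySem.Int.mod (c + 1024) 65535 = c + 1024 := by
      rw [PySem.Int.mod_eq_emod_of_pos hpos]
      exact Int.emod_eq_of_lt (by omega) (by omega)
    simp only [h2]
    rw [if_pos ⟨by omega, by omega⟩]
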